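-- pv_equiv track=rewrite | github.com/josephsenior/Grinta-Agent | backend/core/config/config_loader.py | _to_posix_workspace_path
-- ===== SOURCE A (Python) =====
-- def _to_posix_workspace_path(path: str) -> str:
--     """Convert an OS-specific absolute path to a POSIX-style path."""
--     if not path:
--         return path
--     p = path.replace('\\', '/')
--     if len(p) >= 2 and p[1] == ':':
--         p = p[2:]
--     if not p.startswith('/'):
--         p = f'/{p}'
--     while '//' in p:
--         p = p.replace('//', '/')
--     return p.rstrip('/') if p != '/' else p
-- ===== SOURCE B (Python) =====
-- def _to_posix_workspace_path(path: str) -> str: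
--     """Convert an OS-specific absolute path to a POSIX-style path."""
--     if not path:
--         return path
--     p = path.replace('\\', '/')
--     if len(p) >= 2 and p[1] == ':':
--         p = p[2:]
--     return '/' + '/'.join(filter(None, p.split('/')))
-- ===== Notes on version B (the rewrite author's own statement) =====
-- stated objective: idiomatic
-- what changed: Replaces the quadratic while-'//' replace loop plus conditional rstrip('/') (and the ensure-leading-slash step) with a single tokenizing pass: split on '/', drop empty segments, and rejoin under a fixed leading '/'.
import Mathlib
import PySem

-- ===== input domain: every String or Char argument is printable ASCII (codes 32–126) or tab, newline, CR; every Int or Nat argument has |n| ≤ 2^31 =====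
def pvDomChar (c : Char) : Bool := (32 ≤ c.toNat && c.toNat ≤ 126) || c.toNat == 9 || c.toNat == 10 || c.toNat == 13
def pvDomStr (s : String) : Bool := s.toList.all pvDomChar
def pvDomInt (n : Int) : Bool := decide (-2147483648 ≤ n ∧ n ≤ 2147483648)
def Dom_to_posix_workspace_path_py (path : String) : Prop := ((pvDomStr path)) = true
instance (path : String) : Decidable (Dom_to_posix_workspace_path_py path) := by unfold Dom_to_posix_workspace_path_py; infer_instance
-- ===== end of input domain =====

-- B replaces A's repeated whole-string '//'-replace loop + conditional rstrip('/') with one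
-- split('/')/filter/join pass (idiomatic; same return value on every input).

-- ===== PORT A =====
-- Helpers needed by the port's termination argument (cited by name in decreasing_by):
-- pvStep l = Python `l.replace('//', '/')` (left-to-right, non-overlapping).
def pvStep : List Char → List Char
  | [] => []
  | [c] => [c]
  | a :: b :: r => if a = '/' ∧ b = '/' then '/' :: pvStep r else a :: pvStep (b :: r)

theorem pvReplaceGo_eq (fuel : Nat) (l acc : List Char) (h : l.length ≤ fuel) :
    PySem.Chars.replace.go ['/', '/'] ['/'] fuel l acc = acc.reverse ++ pvStep l := by
  induction fuel generalizing l acc with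
  | zero =>
    cases l with
    | nil => simp [PySem.Chars.replace.go, pvStep]
    | cons c t => simp at h
  | succ n ih =>
    match l with
    | [] => simp [PySem.Chars.replace.go, pvStep]
    | [c] =>
      have hp : ['/', '/'].isPrefixOf [c] = false := by
        simp [List.isPrefixOf]
      rw [PySem.Chars.replace.go, hp]
      simp only [Bool.false_eq_true, if_false]
      rw [ih _ _ (by simp)]
      simp [pvStep]
    | a :: b :: r =>
      by_cases hab : a = '/' ∧ b = '/'
      · obtain ⟨ha, hb⟩ := hab
        subst ha hb
        have hp : ['/', '/'].isPrefixOf ('/' :: '/' :: r) = true := by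
          simp [List.isPrefixOf]
        rw [PySem.Chars.replace.go, hp]
        simp only [if_true]
        rw [ih _ _ (by simp at h ⊢; omega)]
        simp [pvStep]
      · have hp : ['/', '/'].isPrefixOf (a :: b :: r) = false := by
          simp [List.isPrefixOf]
          tauto
        rw [PySem.Chars.replace.go, hp]
        simp only [Bool.false_eq_true, if_false]
        rw [ih _ _ (by simp at h ⊢; omega)]
        simp [pvStep, hab]

theorem pvReplace_eq (p : List Char) :
    PySem.Chars.replace p ['/', '/'] ['/'] = pvStep p := by
  rw [PySem.Chars.replace]
  simp only [List.isEmpty_cons, Bool.false_eq_true, if_false]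
  rw [pvReplaceGo_eq p.length p [] le_rfl]
  simp

theorem pvStep_length_le (p : List Char) : (pvStep p).length ≤ p.length := by
  fun_induction pvStep p <;> simp_all <;> omega

theorem pvStep_length_lt (p : List Char) (h : ['/', '/'] <:+: p) :
    (pvStep p).length < p.length := by
  fun_induction pvStep p with
  | case1 => simp at h
  | case2 c => have := h.length_le; simp at this
  | case3 a b r hab ih =>
    have := pvStep_length_le r
    simp [pvStep, hab]
    omega
  | case4 a b r hab ih =>
    have ht : ['/', '/'] <:+: b :: r := by
      rcases (List.infix_cons_iff).mp h with hp | hi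
      · rcases (List.cons_prefix_cons).mp hp with ⟨ha, hp2⟩
        rcases (List.cons_prefix_cons).mp hp2 with ⟨hb, _⟩
        exact absurd ⟨ha.symm ▸ rfl, hb.symm ▸ rfl⟩ hab
      · exact hi
    have := ih ht
    simp only [List.length_cons] at this
    simp [pvStep, hab]
    omega

theorem pvReplace_lt (p : List Char) (h : PySem.Chars.isIn ['/', '/'] p = true) :
    (PySem.Chars.replace p ['/', '/'] ['/']).length < p.length := by
  rw [pvReplace_eq]
  exact pvStep_length_lt p ((PySem.Chars.isIn_iff_infix _ _).mp h)

-- `while '//' in p: p = p.replace('//', '/')`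
def pvCollapseA (p : List Char) : List Char :=
  if h : PySem.Chars.isIn ['/', '/'] p = true then
    pvCollapseA (PySem.Chars.replace p ['/', '/'] ['/'])
  else p
termination_by p.length
decreasing_by exact pvReplace_lt p h

def to_posix_workspace_path_py (path : String) : String :=
  if path = "" then path
  else
    let p1 := PySem.Chars.replace path.toList ['\\'] ['/']
    -- `len(p) >= 2 and p[1] == ':'`; `p[2:]` with the guard holding is `drop 2` (exact)
    let p2 := if 2 ≤ p1.length ∧ p1[1]? = some ':' then p1.drop 2 else p1
    let p3 := if PySem.Chars.startswith p2 ['/'] then p2 else '/' :: p2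
    let r := pvCollapseA p3
    -- `p.rstrip('/')` ported by hand (PySem has no rstrip-with-chars): drop trailing '/' (exact)
    if r ≠ ['/'] then String.mk ((r.reverse.dropWhile (· == '/')).reverse) else String.mk r

-- ===== PORT B =====
def to_posix_workspace_path_py_alt (path : String) : String :=
  if path = "" then path
  else
    let p1 := PySem.Chars.replace path.toList ['\\'] ['/']
    let p2 := if 2 ≤ p1.length ∧ p1[1]? = some ':' then p1.drop 2 else p1
    -- `'/' + '/'.join(filter(None, p.split('/')))`
    String.mk ('/' :: PySem.Chars.join ['/'] ((PySem.Chars.splitOn p2 ['/']).filter (fun s => !s.isEmpty)))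

-- ===== PRECONDITION & SPEC =====
def Spec_to_posix_workspace_path_py (path : String) (out : String) : Prop := out = to_posix_workspace_path_py_alt path
instance (path : String) (out : String) : Decidable (Spec_to_posix_workspace_path_py path out) := by unfold Spec_to_posix_workspace_path_py; infer_instance

-- ===== CLAIM (what is proved, stated in full; the proofs are below) =====
def Claim_equal_to_posix_workspace_path_py : Prop := ∀ (path : String), Dom_to_posix_workspace_path_py path → Spec_to_posix_workspace_path_py path (to_posix_workspace_path_py path)

-- ===== LEMMAS AND PROOFS =====

-- Spec-side normal forms used only by the proofs.
def pvCollapse : List Char → List Char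
  | [] => []
  | [c] => [c]
  | a :: b :: r => if a = '/' ∧ b = '/' then pvCollapse (b :: r) else a :: pvCollapse (b :: r)

def pvRs : List Char → List Char
  | [] => []
  | a :: x => if pvRs x = [] ∧ a = '/' then [] else a :: pvRs x

mutual
def pvNorm : List Char → List Char
  | [] => []
  | c :: r => if c = '/' then pvNorm r else c :: pvNormSeg r
def pvNormSeg : List Char → List Char
  | [] => []
  | c :: r => if c = '/' then (if pvNorm r = [] then [] else '/' :: pvNorm r) else c :: pvNormSeg r
end

def pvSeg : List Char → List Char
  | [] => []
  | c :: r => if c = '/' then [] else c :: pvSeg r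

def pvRest : List Char → List (List Char)
  | [] => []
  | c :: r => if c = '/' then pvSeg r :: pvRest r else pvRest r

def pvJoin : List (List Char) → List Char
  | [] => []
  | [s] => s
  | s :: f => s ++ '/' :: pvJoin f

-- Basic equations
theorem pvCollapse_ss (r : List Char) : pvCollapse ('/' :: '/' :: r) = pvCollapse ('/' :: r) := by
  simp [pvCollapse]

theorem pvCollapse_not_double {a b : Char} (r : List Char) (hab : ¬ (a = '/' ∧ b = '/')) :
    pvCollapse (a :: b :: r) = a :: pvCollapse (b :: r) := by
  simp [pvCollapse, hab]

theorem pvCollapse_cons_ne {c : Char} (r : List Char) (hc : c ≠ '/') :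
    pvCollapse (c :: r) = c :: pvCollapse r := by
  cases r with
  | nil => simp [pvCollapse]
  | cons b r' => exact pvCollapse_not_double r' (by tauto)

theorem pvCollapse_fix (p : List Char) (h : ¬ ['/', '/'] <:+: p) : pvCollapse p = p := by
  fun_induction pvCollapse p with
  | case1 => rfl
  | case2 c => rfl
  | case3 a b r hab ih =>
    exfalso
    exact h (List.IsPrefix.isInfix (by obtain ⟨ha, hb⟩ := hab; subst ha hb; simp))
  | case4 a b r hab ih =>
    have ht : ¬ ['/', '/'] <:+: b :: r := fun hi => h (List.infix_cons_iff.mpr (Or.inr hi))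
    rw [ih ht]

theorem pvQQ : ∀ n (p : List Char), p.length ≤ n →
    pvCollapse ('/' :: pvStep p) = pvCollapse ('/' :: p) ∧ pvCollapse (pvStep p) = pvCollapse p := by
  intro n
  induction n with
  | zero =>
    intro p hp
    have : p = [] := List.eq_nil_of_length_eq_zero (Nat.le_zero.mp hp)
    subst this
    exact ⟨rfl, rfl⟩
  | succ n ih =>
    intro p hp
    match p with
    | [] => exact ⟨rfl, rfl⟩
    | [c] => exact ⟨rfl, rfl⟩
    | a :: b :: r =>
      simp only [List.length_cons] at hp
      by_cases hab : a = '/' ∧ b = '/'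
      · obtain ⟨ha, hb⟩ := hab
        subst ha hb
        have hr := ih r (by omega)
        constructor
        · show pvCollapse ('/' :: pvStep ('/' :: '/' :: r)) = _
          rw [show pvStep ('/' :: '/' :: r) = '/' :: pvStep r from by simp [pvStep]]
          rw [pvCollapse_ss, hr.1, pvCollapse_ss, pvCollapse_ss]
        · show pvCollapse (pvStep ('/' :: '/' :: r)) = _
          rw [show pvStep ('/' :: '/' :: r) = '/' :: pvStep r from by simp [pvStep]]
          rw [hr.1, pvCollapse_ss]
      · have hbr := ih (b :: r) (by simp; omega)
        have hstep : pvStep (a :: b :: r) = a :: pvStep (b :: r) := by simp [pvStep, hab]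
        by_cases ha : a = '/'
        · subst ha
          constructor
          · rw [hstep, pvCollapse_ss, hbr.1, pvCollapse_ss]
          · rw [hstep]; exact hbr.1
        · constructor
          · rw [hstep, pvCollapse_not_double _ (by tauto), pvCollapse_cons_ne _ ha,
                hbr.2, pvCollapse_not_double _ (by tauto), pvCollapse_cons_ne _ ha]
          · rw [hstep, pvCollapse_cons_ne _ ha, hbr.2, pvCollapse_cons_ne _ ha]

theorem pvCollapseA_eq (p : List Char) : pvCollapseA p = pvCollapse p := by
  fun_induction pvCollapseA p with
  | case1 q h ih =>
    rw [ih, pvReplace_eq]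
    exact (pvQQ q.length q le_rfl).2
  | case2 q h =>
    rw [pvCollapse_fix q (fun hi => h ((PySem.Chars.isIn_iff_infix _ _).mpr hi))]

-- rstrip('/') normal form
theorem pvRs_cons_ne {c : Char} (x : List Char) (hc : c ≠ '/') : pvRs (c :: x) = c :: pvRs x := by
  simp [pvRs, hc]

theorem pvRs_eq (p : List Char) : (p.reverse.dropWhile (· == '/')).reverse = pvRs p := by
  induction p with
  | nil => rfl
  | cons a x ih =>
    rw [List.reverse_cons, List.dropWhile_append]
    by_cases hx : pvRs x = []
    · have : (x.reverse.dropWhile (· == '/')).isEmpty = true := by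
        rw [List.isEmpty_iff]
        have := ih
        rw [hx] at this
        simpa using congrArg List.reverse this
      rw [if_pos this]
      by_cases ha : a = '/'
      · subst ha; simp [pvRs, hx]
      · simp [pvRs, hx, ha]
    · have : ¬ (x.reverse.dropWhile (· == '/')).isEmpty = true := by
        rw [List.isEmpty_iff]
        intro hcon
        apply hx
        rw [← ih, hcon, List.reverse_nil]
      rw [if_neg this]
      rw [List.reverse_append, List.reverse_cons, List.reverse_nil, List.nil_append, ih]
      simp [pvRs, hx]

theorem pvPA2 : ∀ n (r : List Char), r.length ≤ n → pvRs (pvCollapse r) = pvNormSeg r := by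
  intro n
  induction n with
  | zero =>
    intro r hr
    have : r = [] := List.eq_nil_of_length_eq_zero (Nat.le_zero.mp hr)
    subst this; rfl
  | succ n ih =>
    intro r hr
    match r with
    | [] => rfl
    | c :: r' =>
      simp only [List.length_cons] at hr
      by_cases hc : c = '/'
      · subst hc
        match r' with
        | [] => simp [pvCollapse, pvRs, pvNormSeg, pvNorm]
        | '/' :: r'' =>
          rw [pvCollapse_ss, ih ('/' :: r'') (by simp at hr ⊢; omega)]
          simp [pvNormSeg, pvNorm]
        | c' :: r'' =>
          by_cases hc' : c' = '/'
          · subst hc'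
            rw [pvCollapse_ss, ih ('/' :: r'') (by simp at hr ⊢; omega)]
            simp [pvNormSeg, pvNorm]
          · rw [pvCollapse_not_double _ (by tauto), pvCollapse_cons_ne _ hc']
            have h1 : pvRs (c' :: pvCollapse r'') = c' :: pvRs (pvCollapse r'') := pvRs_cons_ne _ hc'
            rw [show pvRs ('/' :: c' :: pvCollapse r'') =
                  '/' :: c' :: pvRs (pvCollapse r'') from by
              rw [pvRs, h1]; simp]
            rw [ih r'' (by simp at hr ⊢; omega)]
            simp [pvNormSeg, pvNorm, hc']
      · rw [pvCollapse_cons_ne _ hc, pvRs_cons_ne _ hc, ih r' (by omega)]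
        simp [pvNormSeg, hc]

theorem pvPA : ∀ n (t : List Char), t.length ≤ n →
    (if pvCollapse ('/' :: t) ≠ ['/'] then pvRs (pvCollapse ('/' :: t)) else pvCollapse ('/' :: t))
      = '/' :: pvNorm t := by
  intro n
  induction n with
  | zero =>
    intro t ht
    have : t = [] := List.eq_nil_of_length_eq_zero (Nat.le_zero.mp ht)
    subst this; simp [pvCollapse, pvNorm]
  | succ n ih =>
    intro t ht
    match t with
    | [] => simp [pvCollapse, pvNorm]
    | '/' :: r =>
      rw [pvCollapse_ss, ih r (by simp at ht; omega)]
      simp [pvNorm]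
    | c :: r =>
      by_cases hc : c = '/'
      · subst hc
        rw [pvCollapse_ss, ih r (by simp at ht; omega)]
        simp [pvNorm]
      · rw [pvCollapse_not_double _ (by tauto), pvCollapse_cons_ne _ hc]
        have hne : ('/' :: c :: pvCollapse r) ≠ ['/'] := by simp
        rw [if_pos hne]
        rw [show pvRs ('/' :: c :: pvCollapse r) = '/' :: c :: pvRs (pvCollapse r) from by
          rw [pvRs, pvRs_cons_ne _ hc]; simp]
        rw [pvPA2 r.length r le_rfl]
        simp [pvNorm, hc]

-- split('/') normal form
theorem pvSplitGo_eq (fuel : Nat) (l cur : List Char) (acc : List (List Char)) (h : l.length ≤ fuel) :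
    PySem.Chars.splitOn.go ['/'] fuel l cur acc
      = acc.reverse ++ (cur.reverse ++ pvSeg l) :: pvRest l := by
  induction fuel generalizing l cur acc with
  | zero =>
    cases l with
    | nil => simp [PySem.Chars.splitOn.go, pvSeg, pvRest]
    | cons c t => simp at h
  | succ n ih =>
    match l with
    | [] => simp [PySem.Chars.splitOn.go, pvSeg, pvRest]
    | c :: r =>
      by_cases hc : c = '/'
      · subst hc
        have hp : ['/'].isPrefixOf ('/' :: r) = true := by simp [List.isPrefixOf]
        rw [PySem.Chars.splitOn.go, hp]
        simp only [if_true]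
        rw [show List.drop ['/'].length ('/' :: r) = r from by simp]
        rw [ih r [] _ (by simp at h; omega)]
        simp [pvSeg, pvRest]
      · have hp : ['/'].isPrefixOf (c :: r) = false := by
          simp [List.isPrefixOf]
          exact fun h => hc h.symm
        rw [PySem.Chars.splitOn.go, hp]
        simp only [Bool.false_eq_true, if_false]
        rw [ih r (c :: cur) acc (by simp at h; omega)]
        simp [pvSeg, pvRest, hc]

theorem pvSplitOn_eq (l : List Char) :
    PySem.Chars.splitOn l ['/'] = pvSeg l :: pvRest l := by
  rw [PySem.Chars.splitOn, pvSplitGo_eq (l.length + 1) l [] [] (by omega)]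
  simp

theorem pvJoin_cons (s : List Char) (f : List (List Char)) :
    pvJoin (s :: f) = s ++ (if f = [] then [] else '/' :: pvJoin f) := by
  cases f with
  | nil => simp [pvJoin]
  | cons t f' => simp [pvJoin]

theorem pvJoin_eq (f : List (List Char)) : PySem.Chars.join ['/'] f = pvJoin f := by
  induction f with
  | nil => rfl
  | cons s f' ih =>
    rw [PySem.Chars.join] at ih ⊢
    cases f' with
    | nil => simp [List.intercalate, pvJoin]
    | cons t f'' =>
      rw [List.intercalate] at ih ⊢
      rw [List.intersperse_cons₂]
      simp only [List.flatten_cons] at ih ⊢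
      rw [pvJoin_cons]
      simp [ih]

theorem pvJoin_ne_nil (f : List (List Char)) (hne : f ≠ []) (hall : ∀ s ∈ f, s ≠ []) :
    pvJoin f ≠ [] := by
  cases f with
  | nil => exact absurd rfl hne
  | cons s f' =>
    rw [pvJoin_cons]
    have : s ≠ [] := hall s (by simp)
    intro hcon
    rcases List.append_eq_nil_iff.mp hcon with ⟨h1, _⟩
    exact this h1

theorem pvPB (l : List Char) :
    pvJoin ((pvSeg l :: pvRest l).filter (fun s => !s.isEmpty)) = pvNorm l ∧
      pvNormSeg l = pvSeg l ++ (if (pvRest l).filter (fun s => !s.isEmpty) = [] then []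
        else '/' :: pvJoin ((pvRest l).filter (fun s => !s.isEmpty))) := by
  induction l with
  | nil => simp [pvSeg, pvRest, pvJoin, pvNorm, pvNormSeg]
  | cons c r ih =>
    by_cases hc : c = '/'
    · subst hc
      have h1 : pvSeg ('/' :: r) = [] := by simp [pvSeg]
      have h2 : pvRest ('/' :: r) = pvSeg r :: pvRest r := by simp [pvRest]
      constructor
      · rw [h1, h2, List.filter_cons]
        simp only [List.isEmpty_nil, Bool.not_true, Bool.false_eq_true, if_false]
        rw [ih.1]
        simp [pvNorm]
      · rw [h1, h2, List.nil_append]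
        by_cases hF : (pvSeg r :: pvRest r).filter (fun s => !s.isEmpty) = []
        · rw [if_pos hF]
          have : pvNorm r = [] := by rw [← ih.1, hF]; rfl
          simp [pvNormSeg, this]
        · rw [if_neg hF, ih.1]
          have : pvNorm r ≠ [] := by
            rw [← ih.1]
            exact pvJoin_ne_nil _ hF (by
              intro s hs
              have := List.of_mem_filter hs
              simpa [List.isEmpty_iff] using this)
          simp [pvNormSeg, this]
    · have h1 : pvSeg (c :: r) = c :: pvSeg r := by simp [pvSeg, hc]
      have h2 : pvRest (c :: r) = pvRest r := by simp [pvRest, hc]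
      constructor
      · rw [h1, h2]
        simp only [List.filter_cons, List.isEmpty_cons, Bool.not_false, if_true]
        rw [pvJoin_cons, List.cons_append, ← ih.2]
        simp [pvNorm, hc]
      · rw [h1, h2, List.cons_append, ← ih.2]
        simp [pvNormSeg, hc]

-- Tail lemma: A's ensure-slash + collapse + trim equals B's split/filter/join under '/'
theorem pvTail_eq (p : List Char) :
    (if pvCollapseA (if PySem.Chars.startswith p ['/'] then p else '/' :: p) ≠ ['/']
      then ((pvCollapseA (if PySem.Chars.startswith p ['/'] then p else '/' :: p)).reverse.dropWhile
          (· == '/')).reverse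
      else pvCollapseA (if PySem.Chars.startswith p ['/'] then p else '/' :: p))
    = '/' :: PySem.Chars.join ['/'] ((PySem.Chars.splitOn p ['/']).filter (fun s => !s.isEmpty)) := by
  rw [pvSplitOn_eq, pvJoin_eq, (pvPB p).1]
  rw [pvRs_eq, pvCollapseA_eq]
  by_cases hs : PySem.Chars.startswith p ['/'] = true
  · rw [if_pos hs]
    have hpre : ['/'] <+: p := by
      have := hs
      rw [PySem.Chars.startswith] at this
      exact List.isPrefixOf_iff_prefix.mp this
    obtain ⟨t, rfl⟩ := hpre
    rw [List.singleton_append]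
    rw [pvPA t.length t le_rfl]
    simp [pvNorm]
  · rw [if_neg hs]
    exact pvPA p.length p le_rfl

-- ===== VERDICT (by name: the statement is the Claim_ definition above) =====
theorem to_posix_workspace_path_py_spec : Claim_equal_to_posix_workspace_path_py := by
  intro path _
  unfold Spec_to_posix_workspace_path_py to_posix_workspace_path_py to_posix_workspace_path_py_alt
  by_cases hp : path = ""
  · simp [hp]
  · rw [if_neg hp, if_neg hp]
    simp only []
    rw [← apply_ite String.mk]
    apply congrArg String.mk
    exact pvTail_eq _
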